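-- pv_equiv track=rewrite | github.com/beyuwa/CSCI-141---Lab-7 | fr.py | days_prior
-- ===== SOURCE A (Python) =====
-- def month_index(month):
--     months = [
--         "Vendemiaire", "Brumaire", "Frimaire", "Nivose", "Pluviose", "Ventoose", "Germinal", "Floreal", "Prairial", "Messidor", "Thermidor", "Fructidor", "Jour de la vertu", "Jour du genie", "Jour du travail", "Jour de l'opinion", "Jour des recompenses", "Jour de la Revolution"
--     ]
--     i = 0
--
--     while True:
--         if months[i] == month:
--             return i
--         else:
--             i += 1
--
-- def days_prior(month):
--     month2day = [
--         30,30,30,30,30,30,30,30,30,30,30,30,1,1,1,1,1,1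
--     ]
--     i = month_index(month)
--     days = 0
--
--     for n in range(i):
--         days += month2day[n]
--
--     return days
-- ===== SOURCE B (Python) =====
-- MONTHS = [
--     "Vendemiaire", "Brumaire", "Frimaire", "Nivose", "Pluviose", "Ventoose",
--     "Germinal", "Floreal", "Prairial", "Messidor", "Thermidor", "Fructidor",
--     "Jour de la vertu", "Jour du genie", "Jour du travail",
--     "Jour de l'opinion", "Jour des recompenses", "Jour de la Revolution",
-- ]
--
-- def days_prior(month):
--     i = MONTHS.index(month)
--     return 30 * i if i < 12 else 360 + (i - 12)
-- ===== Notes on version B (the rewrite author's own statement) =====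
-- stated objective: simpler
-- what changed: Replaces the per-month summation loop over month2day with a closed-form arithmetic expression (30*i for the twelve 30-day months, 360+(i-12) for the complementary days), with the index obtained by list.index instead of a hand-written while loop.
-- outside the precondition, e.g. on days_prior('Foo'): A raises IndexError, B raises ValueError
import Mathlib
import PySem

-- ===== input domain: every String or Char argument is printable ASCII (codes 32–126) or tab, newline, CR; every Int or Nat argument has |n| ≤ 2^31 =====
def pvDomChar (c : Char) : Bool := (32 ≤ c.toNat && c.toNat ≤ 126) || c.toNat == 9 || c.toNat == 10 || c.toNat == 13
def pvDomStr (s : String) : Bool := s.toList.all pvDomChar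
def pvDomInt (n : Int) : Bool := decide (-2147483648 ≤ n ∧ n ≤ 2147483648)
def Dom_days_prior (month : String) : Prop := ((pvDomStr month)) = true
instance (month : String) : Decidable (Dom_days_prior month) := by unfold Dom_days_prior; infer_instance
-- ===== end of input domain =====

-- B replaces A's summation loop by a closed-form arithmetic expression (objective: simpler).

-- ===== PORT A =====
def pvMonths : List String :=
  ["Vendemiaire", "Brumaire", "Frimaire", "Nivose", "Pluviose", "Ventoose",
   "Germinal", "Floreal", "Prairial", "Messidor", "Thermidor", "Fructidor",
   "Jour de la vertu", "Jour du genie", "Jour du travail",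
   "Jour de l'opinion", "Jour des recompenses", "Jour de la Revolution"]

-- A's `while True` loop: increments i until months[i] == month; months[i] raises
-- IndexError (none) once i ≥ 18, which the fuel bound 18 captures exactly.
def pvMonthIndexLoop (month : String) : Nat → Nat → Option Int
  | _, 0 => none
  | i, fuel + 1 =>
    match PySem.List.pyGet? pvMonths (Int.ofNat i) with
    | none => none
    | some m => if m == month then some (Int.ofNat i) else pvMonthIndexLoop month (i + 1) fuel

def pvMonth2day : List Int := [30,30,30,30,30,30,30,30,30,30,30,30,1,1,1,1,1,1]

def days_prior (month : String) : Int :=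
  match pvMonthIndexLoop month 0 18 with
  | none => 0   -- A raises IndexError here; outside Pre_
  | some i =>
    (PySem.List.pyRange 0 i 1).foldl
      (fun days n => days + (PySem.List.pyGet? pvMonth2day n).getD 0) 0

-- ===== PORT B =====
def days_prior_alt (month : String) : Int :=
  match PySem.List.index? pvMonths month with
  | none => 0   -- B raises ValueError here; outside Pre_
  | some i => if i < 12 then 30 * i else 360 + (i - 12)

-- ===== PRECONDITION & SPEC =====
-- Pre_ excludes unknown month names, on which A raises IndexError (and B ValueError).
def Pre_days_prior (month : String) : Prop := month ∈ pvMonths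
instance (month : String) : Decidable (Pre_days_prior month) := by unfold Pre_days_prior; infer_instance
def pvWitness_days_prior : String := "Nivose"

def Spec_days_prior (month : String) (out : Int) : Prop := out = days_prior_alt month
instance (month : String) (out : Int) : Decidable (Spec_days_prior month out) := by unfold Spec_days_prior; infer_instance

-- ===== CLAIM (what is proved, stated in full; the proofs are below) =====
def Claim_equal_days_prior : Prop := ∀ (month : String), Dom_days_prior month → Pre_days_prior month → Spec_days_prior month (days_prior month)

-- ===== LEMMAS AND PROOFS =====

-- ===== VERDICT (by name: the statement is the Claim_ definition above) =====
theorem days_prior_spec : Claim_equal_days_prior := by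
  intro month _ hpre
  unfold Pre_days_prior pvMonths at hpre
  simp only [List.mem_cons, List.not_mem_nil, or_false] at hpre
  rcases hpre with h|h|h|h|h|h|h|h|h|h|h|h|h|h|h|h|h|h <;> subst h <;> decide
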